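-- pv_equiv track=rewrite | github.com/sulph68/im-mesh-client | im-mesh-client-v2.1.0/mesh_image/run/tiles.py | split_tiles
-- ===== SOURCE A (Python) =====
-- from typing import List, Tuple, Dict, Any
--
-- def split_tiles(pixels: List[int], width: int = 128, height: int = 64, tile_size: int = 8) -> List[List[int]]:
--     """
--     Split image pixels into 8x8 tiles.
--
--     Args:
--         pixels: Flat list of pixel values
--         width: Image width (default 128)
--         height: Image height (default 64)
--         tile_size: Size of each tile (default 8)
--
--     Returns:
--         List of tiles, each containing 64 pixels
--     """
--     tiles = []
--     tiles_x = width // tile_size  # 16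
--     tiles_y = height // tile_size  # 8
--
--     for ty in range(tiles_y):
--         for tx in range(tiles_x):
--             tile = []
--             for y in range(tile_size):
--                 for x in range(tile_size):
--                     pixel_x = tx * tile_size + x
--                     pixel_y = ty * tile_size + y
--                     pixel_index = pixel_y * width + pixel_x
--                     tile.append(pixels[pixel_index])
--             tiles.append(tile)
--
--     return tiles
-- ===== SOURCE B (Python) =====
-- from typing import List
--
-- def split_tiles(pixels: List[int], width: int = 128, height: int = 64, tile_size: int = 8) -> List[List[int]]:
--     """Single row-major pass over the cropped image, scattering each pixel
--     into its pre-allocated destination tile, instead of gathering each tile separately."""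
--     tiles_x = width // tile_size
--     tiles_y = height // tile_size
--     tiles = [[] for _ in range(tiles_y) for _ in range(tiles_x)]
--     for py in range(tiles_y * tile_size):
--         row_base = (py // tile_size) * tiles_x
--         for px in range(tiles_x * tile_size):
--             tiles[row_base + px // tile_size].append(pixels[py * width + px])
--     return tiles
-- ===== Notes on version B (the rewrite author's own statement) =====
-- stated objective: alternative
-- what changed: B replaces A's per-tile gather (four nested loops, one pass per tile) by pre-allocating one empty tile per (ty, tx) and scattering each pixel into its destination tile during a single row-major scan of the cropped image.
-- outside the precondition, e.g. on split_tiles([], 8, 8, -8): A returns [], B raises IndexError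
import Mathlib
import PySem

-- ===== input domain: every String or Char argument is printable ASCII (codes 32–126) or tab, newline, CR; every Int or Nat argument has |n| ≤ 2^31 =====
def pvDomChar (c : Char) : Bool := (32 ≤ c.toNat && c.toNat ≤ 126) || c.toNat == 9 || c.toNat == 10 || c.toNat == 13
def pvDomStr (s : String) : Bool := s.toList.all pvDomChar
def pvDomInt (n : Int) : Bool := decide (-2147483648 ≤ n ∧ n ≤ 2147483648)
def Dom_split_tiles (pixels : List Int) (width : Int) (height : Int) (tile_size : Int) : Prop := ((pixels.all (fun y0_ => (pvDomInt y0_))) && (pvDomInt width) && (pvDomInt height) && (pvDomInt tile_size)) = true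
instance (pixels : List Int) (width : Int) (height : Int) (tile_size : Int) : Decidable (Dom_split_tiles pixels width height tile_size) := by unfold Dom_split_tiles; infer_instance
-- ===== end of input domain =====

-- B replaces A's per-tile gather (four nested loops) by one row-major scan that scatters
-- each pixel into its pre-allocated destination tile (objective: alternative decomposition).

-- ===== PORT A =====
def split_tiles (pixels : List Int) (width : Int) (height : Int) (tile_size : Int) : List (List Int) :=
  let tiles_x := PySem.Int.floordiv width tile_size
  let tiles_y := PySem.Int.floordiv height tile_size
  (PySem.List.pyRange 0 tiles_y 1).foldl (fun tiles ty =>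
    (PySem.List.pyRange 0 tiles_x 1).foldl (fun tiles tx =>
      let tile := (PySem.List.pyRange 0 tile_size 1).foldl (fun tile y =>
        (PySem.List.pyRange 0 tile_size 1).foldl (fun tile x =>
          let pixel_x := tx * tile_size + x
          let pixel_y := ty * tile_size + y
          let pixel_index := pixel_y * width + pixel_x
          -- pixels[pixel_index]: in range under Pre_ (out of range = IndexError, excluded)
          tile ++ [PySem.List.pyGetD pixels pixel_index 0]) tile) []
      tiles ++ [tile]) tiles) []

-- ===== PORT B =====
def split_tiles_alt (pixels : List Int) (width : Int) (height : Int) (tile_size : Int) : List (List Int) :=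
  let tiles_x := PySem.Int.floordiv width tile_size
  let tiles_y := PySem.Int.floordiv height tile_size
  let init := (PySem.List.pyRange 0 tiles_y 1).flatMap (fun _ =>
    (PySem.List.pyRange 0 tiles_x 1).map (fun _ => ([] : List Int)))
  (PySem.List.pyRange 0 (tiles_y * tile_size) 1).foldl (fun tiles py =>
    let row_base := PySem.Int.floordiv py tile_size * tiles_x
    (PySem.List.pyRange 0 (tiles_x * tile_size) 1).foldl (fun tiles px =>
      -- tiles[row_base + px // tile_size].append(pixels[py*width+px]):
      -- both indices are nonnegative and in range under Pre_ (.toNat / pyGetD exact there)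
      tiles.modify (row_base + PySem.Int.floordiv px tile_size).toNat
        (fun tl => tl ++ [PySem.List.pyGetD pixels (py * width + px) 0])) tiles) init

-- ===== PRECONDITION & SPEC =====
-- Pre_ excludes tile_size = 0 (A raises ZeroDivisionError), pixel lists too short for the tiled
-- region (A raises IndexError), and negative tile_size with both dimensions positive, a degenerate
-- corner where A's empty result is an accident of its empty inner ranges and B's natural scan raises.
def Pre_split_tiles (pixels : List Int) (width : Int) (height : Int) (tile_size : Int) : Prop :=
  tile_size ≠ 0 ∧
    ((tile_size < 0 ∧ (width ≤ 0 ∨ height ≤ 0)) ∨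
     (0 < tile_size ∧ (width < 0 ∨ height < 0)) ∨
     (0 < tile_size ∧ 0 ≤ width ∧ 0 ≤ height ∧
       (PySem.Int.floordiv width tile_size = 0 ∨ PySem.Int.floordiv height tile_size = 0 ∨
        (PySem.Int.floordiv height tile_size * tile_size - 1) * width
          + PySem.Int.floordiv width tile_size * tile_size ≤ pixels.length)))
instance (pixels : List Int) (width : Int) (height : Int) (tile_size : Int) : Decidable (Pre_split_tiles pixels width height tile_size) := by unfold Pre_split_tiles; infer_instance

def pvWitness_split_tiles : List Int × Int × Int × Int := ([1, 2, 3, 4], 2, 2, 1)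

def Spec_split_tiles (pixels : List Int) (width : Int) (height : Int) (tile_size : Int) (out : List (List Int)) : Prop := out = split_tiles_alt pixels width height tile_size
instance (pixels : List Int) (width : Int) (height : Int) (tile_size : Int) (out : List (List Int)) : Decidable (Spec_split_tiles pixels width height tile_size out) := by unfold Spec_split_tiles; infer_instance

-- ===== CLAIM (what is proved, stated in full; the proofs are below) =====
def Claim_equal_split_tiles : Prop := ∀ (pixels : List Int) (width : Int) (height : Int) (tile_size : Int), Dom_split_tiles pixels width height tile_size → Pre_split_tiles pixels width height tile_size → Spec_split_tiles pixels width height tile_size (split_tiles pixels width height tile_size)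

-- ===== LEMMAS AND PROOFS =====

theorem block_index_inj (TX a b c d : Int) (hb : 0 ≤ b) (hb' : b < TX) (hd : 0 ≤ d) (hd' : d < TX) :
    a * TX + b = c * TX + d ↔ a = c ∧ b = d := by
  constructor
  · intro hEq
    have h3 : a = c := by
      rcases lt_trichotomy a c with h | h | h
      · nlinarith
      · exact h
      · nlinarith
    refine ⟨h3, by rw [h3] at hEq; linarith⟩
  · rintro ⟨rfl, rfl⟩; rfl

theorem toNat_beq (a : Int) (n : Nat) (ha : 0 ≤ a) : (a.toNat == n) = (a == (n : Int)) := by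
  rcases Int.eq_ofNat_of_zero_le ha with ⟨m, rfl⟩
  simp

theorem filter_div_range (Tn tx TXn : Nat) (hT : 0 < Tn) (htx : tx < TXn) :
    (PySem.List.pyRange 0 ((TXn : Int) * (Tn : Int)) 1).filter
        (fun px => PySem.Int.floordiv px (Tn : Int) == (tx : Int))
      = PySem.List.pyRange ((tx : Int) * Tn) ((tx : Int) * Tn + Tn) 1 := by
  have hT' : (0:Int) < (Tn:Int) := by exact_mod_cast hT
  have h1 : (0:Int) ≤ (tx:Int) * Tn := by positivity
  have h2 : (tx:Int) * Tn + Tn ≤ (TXn:Int) * Tn := by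
    have : (tx:Int) + 1 ≤ TXn := by exact_mod_cast htx
    nlinarith
  rw [PySem.List.pyRange_one_append 0 ((tx:Int)*Tn) ((TXn:Int)*Tn) h1 (by linarith),
      PySem.List.pyRange_one_append ((tx:Int)*Tn) ((tx:Int)*Tn+Tn) ((TXn:Int)*Tn) (by linarith) h2,
      List.filter_append, List.filter_append]
  have e1 : (PySem.List.pyRange 0 ((tx:Int)*Tn) 1).filter (fun px => PySem.Int.floordiv px (Tn:Int) == (tx:Int)) = [] := by
    rw [List.filter_eq_nil_iff]
    intro px hpx
    rw [PySem.List.mem_pyRange_one] at hpx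
    simp only [beq_iff_eq]
    intro hc
    rw [PySem.Int.floordiv_eq_iff_of_pos hT'] at hc
    nlinarith [hc.1, hc.2]
  have e3 : (PySem.List.pyRange ((tx:Int)*Tn+Tn) ((TXn:Int)*Tn) 1).filter (fun px => PySem.Int.floordiv px (Tn:Int) == (tx:Int)) = [] := by
    rw [List.filter_eq_nil_iff]
    intro px hpx
    rw [PySem.List.mem_pyRange_one] at hpx
    simp only [beq_iff_eq]
    intro hc
    rw [PySem.Int.floordiv_eq_iff_of_pos hT'] at hc
    nlinarith [hc.1, hc.2]
  have e2 : (PySem.List.pyRange ((tx:Int)*Tn) ((tx:Int)*Tn+Tn) 1).filter (fun px => PySem.Int.floordiv px (Tn:Int) == (tx:Int)) = PySem.List.pyRange ((tx:Int)*Tn) ((tx:Int)*Tn+Tn) 1 := by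
    rw [List.filter_eq_self]
    intro px hpx
    rw [PySem.List.mem_pyRange_one] at hpx
    simp only [beq_iff_eq]
    rw [PySem.Int.floordiv_eq_iff_of_pos hT']
    constructor <;> nlinarith [hpx.1, hpx.2]
  rw [e1, e2, e3, List.nil_append, List.append_nil]

theorem tile_reindex (g : Int → Int → Int) (Tn ty tx : Nat) :
    (PySem.List.pyRange ((ty:Int)*Tn) ((ty:Int)*Tn+Tn) 1).flatMap (fun py =>
      (PySem.List.pyRange ((tx:Int)*Tn) ((tx:Int)*Tn+Tn) 1).map (fun px => g py px))
    = (PySem.List.pyRange 0 (Tn:Int) 1).flatMap (fun y =>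
        (PySem.List.pyRange 0 (Tn:Int) 1).map (fun x => g ((ty:Int)*Tn+y) ((tx:Int)*Tn+x))) := by
  rw [PySem.List.pyRange_one ((ty:Int)*Tn) ((ty:Int)*Tn+Tn),
      PySem.List.pyRange_one ((tx:Int)*Tn) ((tx:Int)*Tn+Tn),
      PySem.List.pyRange_zero (Tn:Int)]
  simp [List.flatMap_map, List.map_map, Function.comp_def]

theorem bucket_eq (g : Int → Int → Int) (Tn TXn TYn ty tx : Nat) (hT : 0 < Tn)
    (hty : ty < TYn) (htx : tx < TXn) :
    (((PySem.List.pyRange 0 ((TYn:Int) * Tn) 1).flatMap (fun py =>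
        (PySem.List.pyRange 0 ((TXn:Int) * Tn) 1).map (fun px =>
          ((PySem.Int.floordiv py (Tn:Int) * TXn + PySem.Int.floordiv px (Tn:Int)).toNat,
            g py px)))).filter (fun p => p.1 == ty * TXn + tx)).map Prod.snd
    = (PySem.List.pyRange 0 (Tn:Int) 1).flatMap (fun y =>
        (PySem.List.pyRange 0 (Tn:Int) 1).map (fun x => g ((ty:Int)*Tn+y) ((tx:Int)*Tn+x))) := by
  have hT' : (0:Int) < (Tn:Int) := by exact_mod_cast hT
  rw [List.filter_flatMap, List.map_flatMap]
  have row : ∀ py ∈ PySem.List.pyRange 0 ((TYn:Int) * Tn) 1,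
      (((PySem.List.pyRange 0 ((TXn:Int) * Tn) 1).map (fun px =>
          ((PySem.Int.floordiv py (Tn:Int) * TXn + PySem.Int.floordiv px (Tn:Int)).toNat,
            g py px))).filter (fun p => p.1 == ty * TXn + tx)).map Prod.snd
        = if PySem.Int.floordiv py (Tn:Int) = (ty:Int)
            then (PySem.List.pyRange ((tx:Int)*Tn) ((tx:Int)*Tn+Tn) 1).map (fun px => g py px)
            else [] := by
    intro py hpy
    rw [PySem.List.mem_pyRange_one] at hpy
    have ha0 : (0:Int) ≤ PySem.Int.floordiv py (Tn:Int) := by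
      rw [PySem.Int.le_floordiv_iff_mul_le hT']; simpa using hpy.1
    rw [List.filter_map, List.map_map]
    have predEq : ∀ px ∈ PySem.List.pyRange 0 ((TXn:Int) * Tn) 1,
        (((fun p : Nat × Int => p.1 == ty * TXn + tx) ∘ (fun px =>
          ((PySem.Int.floordiv py (Tn:Int) * TXn + PySem.Int.floordiv px (Tn:Int)).toNat,
            g py px))) px)
        = (decide (PySem.Int.floordiv py (Tn:Int) = (ty:Int)) &&
            (PySem.Int.floordiv px (Tn:Int) == (tx:Int))) := by
      intro px hpx
      rw [PySem.List.mem_pyRange_one] at hpx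
      have hb0 : (0:Int) ≤ PySem.Int.floordiv px (Tn:Int) := by
        rw [PySem.Int.le_floordiv_iff_mul_le hT']; simpa using hpx.1
      have hblt : PySem.Int.floordiv px (Tn:Int) < (TXn:Int) := by
        rw [PySem.Int.floordiv_lt_iff_lt_mul hT']; exact hpx.2
      show ((PySem.Int.floordiv py (Tn:Int) * TXn + PySem.Int.floordiv px (Tn:Int)).toNat
          == ty * TXn + tx) = _
      rw [toNat_beq _ _ (by positivity)]
      have : ((↑(ty * TXn + tx) : Int)) = (ty:Int) * TXn + tx := by push_cast; ring
      rw [this]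
      rw [show ((PySem.Int.floordiv py (Tn:Int) * TXn + PySem.Int.floordiv px (Tn:Int)
            == (ty:Int) * TXn + tx))
          = decide (PySem.Int.floordiv py (Tn:Int) = (ty:Int) ∧
              PySem.Int.floordiv px (Tn:Int) = (tx:Int)) from by
        rw [Bool.beq_eq_decide_eq]
        congr 1
        exact propext (block_index_inj _ _ _ _ _ hb0 hblt (by exact_mod_cast Nat.zero_le tx)
          (by exact_mod_cast htx))]
      by_cases hcase : PySem.Int.floordiv py (Tn:Int) = (ty:Int)
      · simp [hcase, Bool.beq_eq_decide_eq]
      · simp [hcase]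
    rw [List.filter_congr predEq]
    by_cases hcase : PySem.Int.floordiv py (Tn:Int) = (ty:Int)
    · simp only [hcase, decide_true, Bool.true_and]
      rw [filter_div_range Tn tx TXn hT htx]
      simp [Function.comp_def]
    · simp [hcase]
  rw [List.flatMap_congr row]
  have h0 : (0:Int) ≤ (ty:Int) * Tn := by positivity
  have h2 : (ty:Int) * Tn + Tn ≤ (TYn:Int) * Tn := by
    have : (ty:Int) + 1 ≤ TYn := by exact_mod_cast hty
    nlinarith
  rw [PySem.List.pyRange_one_append 0 ((ty:Int)*Tn) ((TYn:Int)*Tn) h0 (by linarith),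
      PySem.List.pyRange_one_append ((ty:Int)*Tn) ((ty:Int)*Tn+Tn) ((TYn:Int)*Tn) (by linarith) h2,
      List.flatMap_append, List.flatMap_append]
  have e1 : (PySem.List.pyRange 0 ((ty:Int)*Tn) 1).flatMap (fun py =>
      if PySem.Int.floordiv py (Tn:Int) = (ty:Int)
        then (PySem.List.pyRange ((tx:Int)*Tn) ((tx:Int)*Tn+Tn) 1).map (fun px => g py px)
        else []) = [] := by
    rw [List.flatMap_eq_nil_iff]
    intro py hpy
    rw [PySem.List.mem_pyRange_one] at hpy
    have : PySem.Int.floordiv py (Tn:Int) ≠ (ty:Int) := by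
      intro hc; rw [PySem.Int.floordiv_eq_iff_of_pos hT'] at hc
      nlinarith [hc.1, hc.2]
    simp [this]
  have e3 : (PySem.List.pyRange ((ty:Int)*Tn+Tn) ((TYn:Int)*Tn) 1).flatMap (fun py =>
      if PySem.Int.floordiv py (Tn:Int) = (ty:Int)
        then (PySem.List.pyRange ((tx:Int)*Tn) ((tx:Int)*Tn+Tn) 1).map (fun px => g py px)
        else []) = [] := by
    rw [List.flatMap_eq_nil_iff]
    intro py hpy
    rw [PySem.List.mem_pyRange_one] at hpy
    have : PySem.Int.floordiv py (Tn:Int) ≠ (ty:Int) := by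
      intro hc; rw [PySem.Int.floordiv_eq_iff_of_pos hT'] at hc
      nlinarith [hc.1, hc.2]
    simp [this]
  have e2 : (PySem.List.pyRange ((ty:Int)*Tn) ((ty:Int)*Tn+Tn) 1).flatMap (fun py =>
      if PySem.Int.floordiv py (Tn:Int) = (ty:Int)
        then (PySem.List.pyRange ((tx:Int)*Tn) ((tx:Int)*Tn+Tn) 1).map (fun px => g py px)
        else [])
      = (PySem.List.pyRange ((ty:Int)*Tn) ((ty:Int)*Tn+Tn) 1).flatMap (fun py =>
          (PySem.List.pyRange ((tx:Int)*Tn) ((tx:Int)*Tn+Tn) 1).map (fun px => g py px)) := by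
    apply List.flatMap_congr
    intro py hpy
    rw [PySem.List.mem_pyRange_one] at hpy
    have : PySem.Int.floordiv py (Tn:Int) = (ty:Int) := by
      rw [PySem.Int.floordiv_eq_iff_of_pos hT']
      constructor <;> nlinarith [hpy.1, hpy.2]
    simp [this]
  rw [e1, e2, e3, List.nil_append, List.append_nil, tile_reindex]

theorem scatter_length {α : Type} (L : List (Nat × α)) :
    ∀ (init : List (List α)),
      (L.foldl (fun t p => t.modify p.1 (fun tl => tl ++ [p.2])) init).length = init.length := by
  induction L with
  | nil => intro init; rfl
  | cons p L ih => intro init; simpa [List.length_modify] using ih (init.modify p.1 (fun tl => tl ++ [p.2]))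

theorem scatter_getElem? {α : Type} (L : List (Nat × α)) :
    ∀ (init : List (List α)) (k : Nat), k < init.length →
      (L.foldl (fun t p => t.modify p.1 (fun tl => tl ++ [p.2])) init)[k]?
        = some ((init[k]?.getD []) ++ (L.filter (fun p => p.1 == k)).map Prod.snd) := by
  induction L with
  | nil => intro init k hk; simp [List.getElem?_eq_getElem hk]
  | cons p L ih =>
    intro init k hk
    simp only [List.foldl_cons, List.filter_cons]
    rw [ih _ k (by simpa [List.length_modify] using hk)]
    by_cases h : p.1 = k
    · subst h
      simp [List.getElem?_eq_getElem hk]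
    · simp [h]

theorem len_flatMap_map {β : Type} (F : Nat → Nat → β) (n m : Nat) :
    ((List.range n).flatMap (fun i => (List.range m).map (fun j => F i j))).length = n * m := by
  induction n with
  | zero => simp
  | succ n ih => rw [List.range_succ]; simp [ih, Nat.succ_mul]

theorem getElem?_flatMap_map {β : Type} (F : Nat → Nat → β) (n m : Nat) :
    ∀ (k : Nat), k < n * m →
    ((List.range n).flatMap (fun i => (List.range m).map (fun j => F i j)))[k]?
      = some (F (k / m) (k % m)) := by
  induction n with
  | zero => intro k hk; omega
  | succ n ih =>
    intro k hk
    have hk' : k < n * m + m := by simpa [Nat.succ_mul] using hk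
    rw [List.range_succ, List.flatMap_append]
    by_cases h : k < n * m
    · rw [List.getElem?_append_left (by rw [len_flatMap_map]; exact h)]
      exact ih k h
    · rw [List.getElem?_append_right (by rw [len_flatMap_map]; omega)]
      rw [len_flatMap_map]
      have hm : k - n * m < m := by omega
      have h1 : k / m = n := Nat.div_eq_of_lt_le (by omega) (by simpa [Nat.succ_mul] using hk')
      have h2 : k % m = k - n * m := by
        have := Nat.div_add_mod k m
        rw [h1, Nat.mul_comm] at this; omega
      simp [hm, h1, h2]

theorem gather_eq_scatter (g : Int → Int → Int) (Tn TXn TYn : Nat) (hT : 0 < Tn) :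
    (PySem.List.pyRange 0 (TYn:Int) 1).flatMap (fun ty =>
      (PySem.List.pyRange 0 (TXn:Int) 1).map (fun tx =>
        (PySem.List.pyRange 0 (Tn:Int) 1).flatMap (fun y =>
          (PySem.List.pyRange 0 (Tn:Int) 1).map (fun x => g (ty * Tn + y) (tx * Tn + x)))))
    = ((PySem.List.pyRange 0 ((TYn:Int) * Tn) 1).flatMap (fun py =>
        (PySem.List.pyRange 0 ((TXn:Int) * Tn) 1).map (fun px =>
          ((PySem.Int.floordiv py (Tn:Int) * TXn + PySem.Int.floordiv px (Tn:Int)).toNat,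
            g py px)))).foldl
        (fun t p => t.modify p.1 (fun tl => tl ++ [p.2]))
        ((PySem.List.pyRange 0 (TYn:Int) 1).flatMap (fun _ =>
          (PySem.List.pyRange 0 (TXn:Int) 1).map (fun _ => ([] : List Int)))) := by
  have hInitEq : (PySem.List.pyRange 0 (TYn:Int) 1).flatMap (fun _ =>
        (PySem.List.pyRange 0 (TXn:Int) 1).map (fun _ => ([] : List Int)))
      = (List.range TYn).flatMap (fun (i : Nat) => (List.range TXn).map
          (fun (j : Nat) => ([] : List Int))) := by
    rw [PySem.List.pyRange_zero_natCast TYn, PySem.List.pyRange_zero_natCast TXn,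
        List.flatMap_map]
    apply List.flatMap_congr
    intro i _
    rw [List.map_map]
    rfl
  have hInitLen : ((PySem.List.pyRange 0 (TYn:Int) 1).flatMap (fun _ =>
      (PySem.List.pyRange 0 (TXn:Int) 1).map (fun _ => ([] : List Int)))).length
      = TYn * TXn := by
    rw [hInitEq]; exact len_flatMap_map _ TYn TXn
  have hA : (PySem.List.pyRange 0 (TYn:Int) 1).flatMap (fun ty =>
      (PySem.List.pyRange 0 (TXn:Int) 1).map (fun tx =>
        (PySem.List.pyRange 0 (Tn:Int) 1).flatMap (fun y =>
          (PySem.List.pyRange 0 (Tn:Int) 1).map (fun x => g (ty * Tn + y) (tx * Tn + x)))))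
      = (List.range TYn).flatMap (fun (i : Nat) => (List.range TXn).map (fun (j : Nat) =>
          (PySem.List.pyRange 0 (Tn:Int) 1).flatMap (fun y =>
            (PySem.List.pyRange 0 (Tn:Int) 1).map (fun x =>
              g ((i:Int) * Tn + y) ((j:Int) * Tn + x))))) := by
    rw [PySem.List.pyRange_zero_natCast TYn, PySem.List.pyRange_zero_natCast TXn,
        List.flatMap_map]
    apply List.flatMap_congr
    intro i _
    rw [List.map_map]
    rfl
  rw [hA]
  apply List.ext_getElem?
  intro k
  by_cases hk : k < TYn * TXn
  · have hTXpos : 0 < TXn := by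
      rcases Nat.eq_zero_or_pos TXn with h0 | h0
      · rw [h0, Nat.mul_zero] at hk; omega
      · exact h0
    have hty : k / TXn < TYn := by
      rw [Nat.div_lt_iff_lt_mul hTXpos]; omega
    have htx : k % TXn < TXn := Nat.mod_lt _ hTXpos
    rw [getElem?_flatMap_map _ TYn TXn k hk]
    rw [scatter_getElem? _ _ k (by rw [hInitLen]; omega)]
    have hInit : ((PySem.List.pyRange 0 (TYn:Int) 1).flatMap (fun _ =>
        (PySem.List.pyRange 0 (TXn:Int) 1).map (fun _ => ([] : List Int))))[k]? = some [] := by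
      rw [hInitEq]
      exact getElem?_flatMap_map _ TYn TXn k hk
    rw [hInit]
    have hkdecomp : k = k / TXn * TXn + k % TXn := by
      have := Nat.div_add_mod k TXn
      rw [Nat.mul_comm] at this
      omega
    rw [show (fun p : Nat × Int => p.1 == k) = (fun p : Nat × Int => p.1 == k / TXn * TXn + k % TXn) from by
      rw [← hkdecomp]]
    rw [bucket_eq g Tn TXn TYn (k / TXn) (k % TXn) hT hty htx]
    simp
  · have hlenA : ((List.range TYn).flatMap (fun (i : Nat) => (List.range TXn).map (fun (j : Nat) =>
        (PySem.List.pyRange 0 (Tn:Int) 1).flatMap (fun y =>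
          (PySem.List.pyRange 0 (Tn:Int) 1).map (fun x =>
            g ((i:Int) * Tn + y) ((j:Int) * Tn + x)))))).length = TYn * TXn :=
      len_flatMap_map _ TYn TXn
    rw [List.getElem?_eq_none (by rw [hlenA]; omega),
        List.getElem?_eq_none (by rw [scatter_length, hInitLen]; omega)]

-- A's nested gather loops in closed form: one tile per (ty, tx), gathered row by row
theorem flatMap_const_nil {α β : Type} (l : List α) :
    l.flatMap (fun _ => ([] : List β)) = [] :=
  List.flatMap_eq_nil_iff.mpr (fun _ _ => rfl)

theorem A_norm (pixels : List Int) (w h ts : Int) :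
    split_tiles pixels w h ts =
      (PySem.List.pyRange 0 (PySem.Int.floordiv h ts) 1).flatMap (fun ty =>
        (PySem.List.pyRange 0 (PySem.Int.floordiv w ts) 1).map (fun tx =>
          (PySem.List.pyRange 0 ts 1).flatMap (fun y =>
            (PySem.List.pyRange 0 ts 1).map (fun x =>
              PySem.List.pyGetD pixels ((ty * ts + y) * w + (tx * ts + x)) 0)))) := by
  simp only [split_tiles, PySem.List.foldl_append_singleton_eq_map,
    PySem.List.foldl_append_eq_flatMap, List.nil_append]

-- B's nested scatter loops as one scatter fold over the row-major (py, px) pair list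
theorem B_norm (pixels : List Int) (w h ts : Int) :
    split_tiles_alt pixels w h ts =
      ((PySem.List.pyRange 0 (PySem.Int.floordiv h ts * ts) 1).flatMap (fun py =>
        (PySem.List.pyRange 0 (PySem.Int.floordiv w ts * ts) 1).map (fun px =>
          ((PySem.Int.floordiv py ts * PySem.Int.floordiv w ts + PySem.Int.floordiv px ts).toNat,
            PySem.List.pyGetD pixels (py * w + px) 0)))).foldl
        (fun t p => t.modify p.1 (fun tl => tl ++ [p.2]))
        ((PySem.List.pyRange 0 (PySem.Int.floordiv h ts) 1).flatMap (fun _ =>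
          (PySem.List.pyRange 0 (PySem.Int.floordiv w ts) 1).map (fun _ => ([] : List Int)))) := by
  simp only [split_tiles_alt, List.foldl_flatMap, List.foldl_map]

-- ===== VERDICT (by name: the statement is the Claim_ definition above) =====
theorem split_tiles_spec : Claim_equal_split_tiles := by
  intro pixels w h ts _dom hpre
  obtain ⟨hne, hcases⟩ := hpre
  unfold Spec_split_tiles
  rw [A_norm, B_norm]
  rcases hcases with ⟨hts, hwh⟩ | ⟨hts, hwh⟩ | ⟨hts, hw, hh, _⟩
  · -- tile_size < 0, and width ≤ 0 or height ≤ 0: no pixel is visited on either side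
    have hA0 : PySem.List.pyRange 0 ts 1 = [] := PySem.List.pyRange_one_eq_nil (by linarith)
    rcases hwh with hw | hh
    · have hTX0 : 0 ≤ PySem.Int.floordiv w ts := by
        rw [show PySem.Int.floordiv w ts = PySem.Int.floordiv (-(-w)) (-(-ts)) by ring_nf,
            PySem.Int.floordiv_neg_neg, PySem.Int.floordiv_eq_ediv_of_pos (by linarith)]
        exact Int.ediv_nonneg (by linarith) (by linarith)
      have hpx : PySem.List.pyRange 0 (PySem.Int.floordiv w ts * ts) 1 = [] :=
        PySem.List.pyRange_one_eq_nil (by nlinarith)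
      rw [hpx]
      simp [hA0, flatMap_const_nil]
    · have hTY0 : 0 ≤ PySem.Int.floordiv h ts := by
        rw [show PySem.Int.floordiv h ts = PySem.Int.floordiv (-(-h)) (-(-ts)) by ring_nf,
            PySem.Int.floordiv_neg_neg, PySem.Int.floordiv_eq_ediv_of_pos (by linarith)]
        exact Int.ediv_nonneg (by linarith) (by linarith)
      have hpy : PySem.List.pyRange 0 (PySem.Int.floordiv h ts * ts) 1 = [] :=
        PySem.List.pyRange_one_eq_nil (by nlinarith)
      rw [hpy]
      simp [hA0]
  · -- 0 < tile_size but a negative dimension: both sides are []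
    rcases hwh with hw | hh
    · have hTXneg : PySem.Int.floordiv w ts < 0 := by
        rw [PySem.Int.floordiv_lt_iff_lt_mul hts]; linarith
      have hTX : PySem.List.pyRange 0 (PySem.Int.floordiv w ts) 1 = [] :=
        PySem.List.pyRange_one_eq_nil (by linarith)
      have hpx : PySem.List.pyRange 0 (PySem.Int.floordiv w ts * ts) 1 = [] :=
        PySem.List.pyRange_one_eq_nil (by nlinarith)
      rw [hTX, hpx]
      simp [flatMap_const_nil]
    · have hTYneg : PySem.Int.floordiv h ts < 0 := by
        rw [PySem.Int.floordiv_lt_iff_lt_mul hts]; linarith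
      have hTY : PySem.List.pyRange 0 (PySem.Int.floordiv h ts) 1 = [] :=
        PySem.List.pyRange_one_eq_nil (by linarith)
      have hpy : PySem.List.pyRange 0 (PySem.Int.floordiv h ts * ts) 1 = [] :=
        PySem.List.pyRange_one_eq_nil (by nlinarith)
      rw [hTY, hpy]
      simp
  · -- the regular case: positive tile size, nonnegative dimensions
    obtain ⟨Tn, hTn⟩ := Int.eq_ofNat_of_zero_le hts.le
    rw [hTn]
    have hts' : (0 : Int) < (Tn : Int) := by rw [← hTn]; exact hts
    have hTX0 : 0 ≤ PySem.Int.floordiv w (Tn : Int) := by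
      rw [PySem.Int.le_floordiv_iff_mul_le hts']; simpa using hw
    have hTY0 : 0 ≤ PySem.Int.floordiv h (Tn : Int) := by
      rw [PySem.Int.le_floordiv_iff_mul_le hts']; simpa using hh
    obtain ⟨TXn, hTXn⟩ := Int.eq_ofNat_of_zero_le hTX0
    obtain ⟨TYn, hTYn⟩ := Int.eq_ofNat_of_zero_le hTY0
    rw [hTXn, hTYn]
    exact gather_eq_scatter (fun py px => PySem.List.pyGetD pixels (py * w + px) 0)
      Tn TXn TYn (by exact_mod_cast hts')
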